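-- pv_equiv track=rewrite | github.com/pedroangelini/aoc2024 | day4_find_xmas.py | skew_down
-- ===== SOURCE A (Python) =====
-- def empty_board(rows: int, cols: int | None = None) -> list[list[str]]:
--     if cols is None:
--         cols = rows
--     return [list("_" * cols) for _ in range(rows)]
--
-- def skew_down(board: list[list[str]]) -> list[list[str]]:
--     rows = len(board)
--     cols = len(board[0])
--     skewed = empty_board(rows * 2 - 1, cols)
--     # print_nice(rotated)
--     for i in range(rows):  # lines
--         for j in range(cols):  # cols
--             skewed[i + j][j] = board[i][j]
--
--     return skewed
-- ===== SOURCE B (Python) =====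
-- def skew_down(board: list[list[str]]) -> list[list[str]]:
--     rows = len(board)
--     cols = len(board[0])
--     return [
--         [board[r - j][j] if 0 <= r - j < rows else "_" for j in range(cols)]
--         for r in range(2 * rows - 1)
--     ]
-- ===== Notes on version B (the rewrite author's own statement) =====
-- stated objective: simpler
-- what changed: Replaces the pre-allocated grid with scatter-writes (skewed[i+j][j] = board[i][j]) by a direct gather comprehension that builds each output row, computing board[r-j][j] when 0 <= r-j < rows and '_' otherwise.
import Mathlib
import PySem

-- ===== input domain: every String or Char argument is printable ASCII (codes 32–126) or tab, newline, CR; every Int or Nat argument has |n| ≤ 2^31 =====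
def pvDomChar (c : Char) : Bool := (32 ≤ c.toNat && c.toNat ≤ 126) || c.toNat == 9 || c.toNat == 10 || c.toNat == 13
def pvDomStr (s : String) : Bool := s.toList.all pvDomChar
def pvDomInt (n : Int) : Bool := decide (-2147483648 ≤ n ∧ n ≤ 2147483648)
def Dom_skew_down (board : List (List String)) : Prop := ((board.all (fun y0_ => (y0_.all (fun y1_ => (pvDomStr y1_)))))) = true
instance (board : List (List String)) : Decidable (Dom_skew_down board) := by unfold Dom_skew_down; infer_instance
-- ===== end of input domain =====

-- B replaces A's scatter-writes into a pre-allocated grid by a direct gather comprehension over the output cells (simpler).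


-- ===== PORT A =====
-- empty_board(rows, cols): [list("_" * cols) for _ in range(rows)]
def emptyBoard (rows cols : Int) : List (List String) :=
  (PySem.List.pyRange 0 rows 1).map (fun _ => List.replicate cols.toNat "_")

-- literal port of A; board[i][j] reads use getD with a default never reached inside Pre_
def skew_down (board : List (List String)) : List (List String) :=
  let rows : Int := board.length
  let cols : Int := (board.getD 0 []).length
  let skewed := emptyBoard (rows * 2 - 1) cols
  (PySem.List.pyRange 0 rows 1).foldl (fun sk i =>
    (PySem.List.pyRange 0 cols 1).foldl (fun sk j =>
      sk.set (i + j).toNat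
        ((sk.getD (i + j).toNat []).set j.toNat ((board.getD i.toNat []).getD j.toNat "_"))) sk)
    skewed

-- ===== PORT B =====
def skew_down_alt (board : List (List String)) : List (List String) :=
  let rows : Int := board.length
  let cols : Int := (board.getD 0 []).length
  (PySem.List.pyRange 0 (2 * rows - 1) 1).map (fun r =>
    (PySem.List.pyRange 0 cols 1).map (fun j =>
      if 0 ≤ r - j ∧ r - j < rows then (board.getD (r - j).toNat []).getD j.toNat "_" else "_"))

-- ===== PRECONDITION & SPEC =====
-- Pre_ = exactly the inputs on which A returns: nonempty board, every row at least cols = len(board[0])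
-- entries long (a shorter row raises IndexError on board[i][j]), and cols ≤ rows (otherwise the
-- 2*rows-1 skewed grid is too short and skewed[i+j] raises IndexError).
def Pre_skew_down (board : List (List String)) : Prop :=
  board ≠ [] ∧
  (∀ row ∈ board, (board.getD 0 []).length ≤ row.length) ∧
  (board.getD 0 []).length ≤ board.length

instance (board : List (List String)) : Decidable (Pre_skew_down board) := by
  unfold Pre_skew_down; infer_instance

def pvWitness_skew_down : List (List String) := [["a", "b"], ["c", "d"]]

def Spec_skew_down (board : List (List String)) (out : List (List String)) : Prop := out = skew_down_alt board
instance (board : List (List String)) (out : List (List String)) : Decidable (Spec_skew_down board out) := by unfold Spec_skew_down; infer_instance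

-- ===== CLAIM (what is proved, stated in full; the proofs are below) =====
def Claim_equal_skew_down : Prop := ∀ (board : List (List String)), Dom_skew_down board → Pre_skew_down board → Spec_skew_down board (skew_down board)

-- ===== LEMMAS AND PROOFS =====

-- board cell with default (never hit inside Pre_)
def bcell (board : List (List String)) (i j : Nat) : String := (board.getD i []).getD j "_"

-- a grid of R rows and C columns given by a cell function
def mkGrid (R C : Nat) (f : Nat → Nat → String) : List (List String) :=
  (List.range R).map (fun r => (List.range C).map (f r))

-- grid contents after A has processed rows 0..i-1 fully and, in row i, columns 0..k-1
def Gcell (board : List (List String)) (i k r c : Nat) : String :=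
  if c ≤ r ∧ (r - c < i ∨ (r - c = i ∧ c < k)) then bcell board (r - c) c else "_"

theorem set_map_range {α : Type} (C : Nat) (g : Nat → α) (c : Nat) (v : α) (hc : c < C) :
    ((List.range C).map g).set c v = (List.range C).map (fun c' => if c' = c then v else g c') := by
  apply List.ext_getElem
  · simp
  · intro k h1 h2
    simp only [List.length_map, List.length_range] at h1 h2
    by_cases hk : k = c
    · subst hk
      simp [List.getElem_set_self]
    · rw [List.getElem_set_ne (by omega)]
      simp [hk]

theorem mkGrid_congr (R C : Nat) (f g : Nat → Nat → String)
    (h : ∀ r < R, ∀ c < C, f r c = g r c) : mkGrid R C f = mkGrid R C g := by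
  unfold mkGrid
  refine List.map_congr_left (fun r hr => ?_)
  refine List.map_congr_left (fun c hc => ?_)
  exact h r (List.mem_range.mp hr) c (List.mem_range.mp hc)

theorem mkGrid_set (R C : Nat) (f : Nat → Nat → String) (r c : Nat) (v : String)
    (hr : r < R) (hc : c < C) :
    (mkGrid R C f).set r (((mkGrid R C f).getD r []).set c v)
      = mkGrid R C (fun r' c' => if r' = r ∧ c' = c then v else f r' c') := by
  unfold mkGrid
  rw [PySem.List.getD_map_range _ _ _ _ hr, set_map_range C (f r) c v hc,
      set_map_range R _ r _ hr]
  refine List.map_congr_left (fun r' _ => ?_)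
  by_cases h1 : r' = r
  · subst h1
    rw [if_pos rfl]
    refine List.map_congr_left (fun c' _ => ?_)
    by_cases h2 : c' = c <;> simp [h2]
  · simp only [if_neg h1]
    refine List.map_congr_left (fun c' _ => ?_)
    simp [h1]

theorem Gstep (board : List (List String)) (i k : Nat) :
    (fun r c => if r = i + k ∧ c = k then bcell board i k else Gcell board i k r c)
      = Gcell board i (k + 1) := by
  funext r c
  unfold Gcell
  by_cases h1 : r = i + k ∧ c = k
  · obtain ⟨hr, hc⟩ := h1
    rw [if_pos ⟨hr, hc⟩, if_pos (by omega), show r - c = i by omega, hc]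
  · rw [if_neg h1]
    by_cases h2 : c ≤ r ∧ (r - c < i ∨ (r - c = i ∧ c < k))
    · rw [if_pos h2, if_pos (by omega)]
    · rw [if_neg h2, if_neg (by omega)]

theorem foldl_inner (board : List (List String)) (R C i : Nat)
    (hiR : ∀ j < C, i + j < R) (k : Nat) (hk : k ≤ C) :
    (List.range k).foldl
        (fun sk j => sk.set (i + j) ((sk.getD (i + j) []).set j (bcell board i j)))
        (mkGrid R C (Gcell board i 0))
      = mkGrid R C (Gcell board i k) := by
  induction k with
  | zero => simp
  | succ k ih =>
      rw [List.range_succ, List.foldl_append, ih (by omega)]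
      simp only [List.foldl_cons, List.foldl_nil]
      rw [mkGrid_set R C _ (i + k) k _ (hiR k (by omega)) (by omega), Gstep]

theorem foldl_outer (board : List (List String)) (R C : Nat)
    (hiR : ∀ i' j, i' < board.length → j < C → i' + j < R) (m : Nat) (hm : m ≤ board.length) :
    (List.range m).foldl
        (fun sk i => (List.range C).foldl
          (fun sk j => sk.set (i + j) ((sk.getD (i + j) []).set j (bcell board i j))) sk)
        (mkGrid R C (Gcell board 0 0))
      = mkGrid R C (Gcell board m 0) := by
  induction m with
  | zero => simp
  | succ m ih =>
      rw [List.range_succ, List.foldl_append, ih (by omega)]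
      simp only [List.foldl_cons, List.foldl_nil]
      rw [foldl_inner board R C m (fun j hj => hiR m j (by omega) hj) C le_rfl]
      refine mkGrid_congr R C _ _ (fun r hr c hc => ?_)
      unfold Gcell
      by_cases h : c ≤ r ∧ (r - c < m ∨ (r - c = m ∧ c < C))
      · rw [if_pos h, if_pos (by omega)]
      · rw [if_neg h, if_neg (by omega)]

theorem replicate_eq_map_range {α : Type} (c : Nat) (a : α) :
    List.replicate c a = (List.range c).map (fun _ => a) :=
  (List.eq_replicate_iff.mpr ⟨by simp, by simp⟩).symm

-- A computes the grid described by Gcell board n 0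
theorem skew_down_eq_mkGrid (board : List (List String)) (hne : board ≠ [])
    (hC : (board.getD 0 []).length ≤ board.length) :
    skew_down board
      = mkGrid (2 * board.length - 1) (board.getD 0 []).length (Gcell board board.length 0) := by
  unfold skew_down emptyBoard
  have hn : 1 ≤ board.length := List.length_pos_iff.mpr hne
  have hR : ((board.length : Int) * 2 - 1).toNat = 2 * board.length - 1 := by omega
  simp only [PySem.List.pyRange_zero, List.foldl_map, Int.toNat_natCast, ← Int.natCast_add, hR]
  have hinit : (List.map (fun _ => List.replicate (board.getD 0 []).length "_")
      (List.map (fun k => ((k : Nat) : Int)) (List.range (2 * board.length - 1))))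
      = mkGrid (2 * board.length - 1) (board.getD 0 []).length (Gcell board 0 0) := by
    rw [List.map_map]
    unfold mkGrid
    refine List.map_congr_left (fun r _ => ?_)
    show List.replicate (board.getD 0 []).length "_" = _
    rw [replicate_eq_map_range]
    refine List.map_congr_left (fun c _ => ?_)
    unfold Gcell
    rw [if_neg (by omega)]
  rw [hinit]
  exact foldl_outer board _ _ (fun i' j h1 h2 => by omega) board.length le_rfl

-- B computes the same grid
theorem skew_down_alt_eq_mkGrid (board : List (List String)) (hne : board ≠ []) :
    skew_down_alt board
      = mkGrid (2 * board.length - 1) (board.getD 0 []).length (Gcell board board.length 0) := by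
  unfold skew_down_alt mkGrid
  have hn : 1 ≤ board.length := List.length_pos_iff.mpr hne
  have hR : (2 * (board.length : Int) - 1).toNat = 2 * board.length - 1 := by omega
  simp only [PySem.List.pyRange_zero, List.map_map, Int.toNat_natCast, hR]
  refine List.map_congr_left (fun r _ => ?_)
  refine List.map_congr_left (fun c _ => ?_)
  simp only [Function.comp]
  have h1 : (((r : Int)) - c).toNat = r - c := by omega
  have h2 : ((c : Int)).toNat = c := Int.toNat_natCast c
  unfold Gcell bcell
  split_ifs with ha hb hb
  · rw [h1, h2]
  · exfalso; omega
  · exfalso; omega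
  · rfl

-- ===== VERDICT (by name: the statement is the Claim_ definition above) =====
theorem skew_down_spec : Claim_equal_skew_down := by
  intro board _ hPre
  unfold Spec_skew_down
  rw [skew_down_eq_mkGrid board hPre.1 hPre.2.2, skew_down_alt_eq_mkGrid board hPre.1]
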